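-- pv_equiv track=rewrite | github.com/gauravmanmode/python_practice | leetcode_november/b.py | go
-- ===== SOURCE A (Python) =====
-- def go(ver,A,B):
--     if ver[-1] == A:
--         return 1
--
--
--     for [i,j] in B:
--         res = 0
--         if i == ver[-1] and j not in ver:
--             ver.append(j)
--             res+=go(ver,A,B)
--             return res
--     return 0
-- ===== SOURCE B (Python) =====
-- def go(ver, A, B):
--     adj = {}
--     for i, j in B:
--         adj.setdefault(i, []).append(j)
--     while True:
--         cur = ver[-1]
--         if cur == A:
--             return 1
--         for j in adj.get(cur, []):
--             if j not in ver:
--                 ver.append(j)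
--                 break
--         else:
--             return 0
-- ===== Notes on version B (the rewrite author's own statement) =====
-- stated objective: alternative
-- what changed: B first builds an adjacency dictionary (vertex -> ordered list of successors) in one pass over the edge list, then walks iteratively via dictionary lookups instead of A's recursion with a full edge-list rescan at every step.
-- outside the precondition, e.g. on go([2], 2, [[1, 2, 3]]): A returns 1, B raises ValueError
import Mathlib
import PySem

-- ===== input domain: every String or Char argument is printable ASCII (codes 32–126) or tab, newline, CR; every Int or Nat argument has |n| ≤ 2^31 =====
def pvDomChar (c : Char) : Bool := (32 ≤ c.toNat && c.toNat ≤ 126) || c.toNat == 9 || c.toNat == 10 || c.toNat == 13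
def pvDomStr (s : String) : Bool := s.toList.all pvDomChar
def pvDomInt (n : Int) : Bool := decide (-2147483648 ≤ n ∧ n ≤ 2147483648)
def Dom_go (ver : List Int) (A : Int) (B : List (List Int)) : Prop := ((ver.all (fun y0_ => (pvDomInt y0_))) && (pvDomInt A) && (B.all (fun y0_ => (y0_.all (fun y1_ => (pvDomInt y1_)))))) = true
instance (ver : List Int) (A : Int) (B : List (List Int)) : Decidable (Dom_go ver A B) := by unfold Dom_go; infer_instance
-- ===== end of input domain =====

-- B builds an adjacency dictionary once and then walks iteratively by dictionary lookup,
-- replacing A's recursion with a full edge-list rescan at every step. Both A and B mutate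
-- `ver` in place (append the same path); the theorems here are about the return value.
-- Fuel (B.length + 1) is a totality guard only: each step appends a vertex not yet in
-- `ver` drawn from B's edges, so at most B.length steps can occur.

-- ===== PORT A =====
mutual
-- the `for [i,j] in B:` loop, with A's recursive call nested inside it
def goScanA (fuel : Nat) (ver : List Int) (A : Int) (B : List (List Int))
    (edges : List (List Int)) (last : Int) : Int :=
  match edges with
  | [] => 0
  | e :: rest =>
    match e with
    | [i, j] =>
      if i = last ∧ j ∉ ver then goFuelA fuel (ver ++ [j]) A B
      else goScanA fuel ver A B rest last
    | _ => 0  -- Python raises ValueError here (excluded by Pre_go)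
termination_by (fuel, edges.length + 1)

def goFuelA (fuel : Nat) (ver : List Int) (A : Int) (B : List (List Int)) : Int :=
  match fuel with
  | 0 => 0  -- never reached: fuel B.length+1 suffices (see header)
  | fuel' + 1 =>
    match ver.getLast? with
    | none => 0  -- Python raises IndexError on ver[-1] (excluded by Pre_go)
    | some last =>
      if last = A then 1
      else goScanA fuel' ver A B B last
termination_by (fuel, 0)
end

def go (ver : List Int) (A : Int) (B : List (List Int)) : Int :=
  goFuelA (B.length + 1) ver A B

-- ===== PORT B =====
-- `adj = {}; for i, j in B: adj.setdefault(i, []).append(j)` of Source B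
def buildAdj (B : List (List Int)) : PySem.Dict Int (List Int) :=
  B.foldl (fun d e =>
    match e with
    | [i, j] => d.modify i [] (· ++ [j])
    | _ => d  -- Python raises ValueError unpacking here (excluded by Pre_go)
  ) PySem.Dict.empty

-- the inner `for j in adj.get(cur, []):` scan of Source B
def firstUnvisited (ver : List Int) : List Int → Option Int
  | [] => none
  | j :: rest => if j ∉ ver then some j else firstUnvisited ver rest

-- the `while True:` loop of Source B
def walkB (fuel : Nat) (ver : List Int) (A : Int) (adj : PySem.Dict Int (List Int)) : Int :=
  match fuel with
  | 0 => 0  -- never reached: fuel B.length+1 suffices (see header)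
  | fuel' + 1 =>
    match ver.getLast? with
    | none => 0  -- Python raises IndexError on ver[-1] (excluded by Pre_go)
    | some cur =>
      if cur = A then 1
      else
        match firstUnvisited ver (adj.getD cur []) with
        | some j => walkB fuel' (ver ++ [j]) A adj
        | none => 0

def go_alt (ver : List Int) (A : Int) (B : List (List Int)) : Int :=
  walkB (B.length + 1) ver A (buildAdj B)

-- ===== PRECONDITION & SPEC =====
-- Pre_go excludes empty `ver` (A raises IndexError on ver[-1]) and edge lists containing a
-- non-pair edge: A raises ValueError whenever its scan reaches such an edge (and B raises
-- while building the dictionary, even when A stops before scanning).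
def Pre_go (ver : List Int) (A : Int) (B : List (List Int)) : Prop :=
  ver ≠ [] ∧ ∀ e ∈ B, e.length = 2
instance (ver : List Int) (A : Int) (B : List (List Int)) : Decidable (Pre_go ver A B) := by
  unfold Pre_go; infer_instance
def pvWitness_go : List Int × Int × List (List Int) := ([1], 3, [[1, 2], [2, 3]])
def Spec_go (ver : List Int) (A : Int) (B : List (List Int)) (out : Int) : Prop := out = go_alt ver A B
instance (ver : List Int) (A : Int) (B : List (List Int)) (out : Int) : Decidable (Spec_go ver A B out) := by unfold Spec_go; infer_instance

-- ===== CLAIM (what is proved, stated in full; the proofs are below) =====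
def Claim_equal_go : Prop := ∀ (ver : List Int) (A : Int) (B : List (List Int)), Dom_go ver A B → Pre_go ver A B → Spec_go ver A B (go ver A B)

-- ===== LEMMAS AND PROOFS =====

-- successors of k, in edge-list order (proof-only abbreviation)
def sel (k : Int) : List (List Int) → List Int
  | [] => []
  | e :: rest =>
    match e with
    | [i, j] => (if i = k then [j] else []) ++ sel k rest
    | _ => sel k rest

-- the adjacency dictionary built by B holds exactly the in-order successor list
theorem buildAdj_getD (B : List (List Int)) (h2 : ∀ e ∈ B, e.length = 2)
    (d : PySem.Dict Int (List Int)) (k : Int) :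
    (B.foldl (fun d e =>
      match e with
      | [i, j] => d.modify i [] (· ++ [j])
      | _ => d) d).getD k [] = d.getD k [] ++ sel k B := by
  induction B generalizing d with
  | nil => simp [sel]
  | cons e rest ih =>
    match e, h2 e (by simp) with
    | [i, j], _ =>
      simp only [List.foldl_cons]
      rw [ih (fun e he => h2 e (by simp [he]))]
      simp only [sel, PySem.Dict.getD_modify]
      by_cases hk : k = i
      · subst hk; simp
      · have hik : ¬ i = k := fun h => hk (Eq.symm h)
        simp [hk, hik]

-- A's edge scan finds exactly the first unvisited successor
theorem findfirst (ver : List Int) (A : Int) (B : List (List Int)) (fuel : Nat)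
    (edges : List (List Int)) (h2 : ∀ e ∈ edges, e.length = 2) (last : Int) :
    goScanA fuel ver A B edges last =
      match firstUnvisited ver (sel last edges) with
      | some j => goFuelA fuel (ver ++ [j]) A B
      | none => 0 := by
  induction edges with
  | nil => simp [goScanA, sel, firstUnvisited]
  | cons e rest ih =>
    match e, h2 e (by simp) with
    | [i, j], _ =>
      have ih' := ih (fun e he => h2 e (by simp [he]))
      by_cases hi : i = last
      · by_cases hj : j ∈ ver
        · simp only [goScanA]
          rw [if_neg (by simp [hj])]
          simp only [sel, if_pos hi, List.singleton_append, firstUnvisited]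
          rw [if_neg (by simp [hj])]
          exact ih'
        · simp only [goScanA]
          rw [if_pos ⟨hi, hj⟩]
          simp [sel, hi, firstUnvisited, hj]
      · simp only [goScanA]
        rw [if_neg (by simp [hi])]
        simp only [sel, if_neg hi, List.nil_append]
        exact ih'

theorem goFuelA_eq_walkB (B : List (List Int)) (h2 : ∀ e ∈ B, e.length = 2)
    (fuel : Nat) (ver : List Int) (A : Int) :
    goFuelA fuel ver A B = walkB fuel ver A (buildAdj B) := by
  induction fuel generalizing ver with
  | zero => simp [goFuelA, walkB]
  | succ fuel' ih =>
    simp only [goFuelA, walkB]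
    match ver.getLast? with
    | none => rfl
    | some last =>
      by_cases h : last = A
      · simp [h]
      · simp only [if_neg h, findfirst ver A B fuel' B h2 last]
        have hget : (buildAdj B).getD last [] = sel last B := by
          simpa [PySem.Dict.getD_empty] using buildAdj_getD B h2 PySem.Dict.empty last
        rw [hget]
        match firstUnvisited ver (sel last B) with
        | some j => exact ih (ver ++ [j])
        | none => rfl

-- ===== VERDICT (by name: the statement is the Claim_ definition above) =====
theorem go_spec : Claim_equal_go := by
  intro ver A B _ hpre
  unfold Spec_go go go_alt
  exact goFuelA_eq_walkB B hpre.2 _ ver A
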